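-- pv_equiv track=rewrite | github.com/YiCITI/PhosSight | Phosdetect/evaluate on three phospho datasets/mouse/process_mouse.py | trypsin_digest
-- ===== SOURCE A (Python) =====
-- def trypsin_digest(protein_sequence, min_len=7, max_len=51, max_missed=2):
--     """胰蛋白酶消化"""
--     peptides = []
--     cleavage_sites = [0]
--     for i, aa in enumerate(protein_sequence):
--         if aa in 'KR' and i + 1 < len(protein_sequence):
--             next_aa = protein_sequence[i + 1]
--             if next_aa != 'P':
--                 cleavage_sites.append(i + 1)
--     cleavage_sites.append(len(protein_sequence))
--     for i in range(len(cleavage_sites) - 1):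
--         start = cleavage_sites[i]
--         for j in range(i + 1, min(i + 1 + max_missed + 1, len(cleavage_sites))):
--             end = cleavage_sites[j]
--             peptide = protein_sequence[start:end]
--             if min_len <= len(peptide) <= max_len:
--                 peptides.append(peptide)
--     return peptides
-- ===== SOURCE B (Python) =====
-- def trypsin_digest(protein_sequence, min_len=7, max_len=51, max_missed=2):
--     """Recursive decomposition: split the sequence into fully-cleaved fragments at the
--     first cleavage site (after K/R unless followed by P), then for each suffix of the
--     fragment list emit the accumulated prefixes whose length is in range."""
--     def frags(s):
--         for k in range(len(s) - 1):
--             if s[k] in 'KR' and s[k + 1] != 'P':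
--                 return [s[:k + 1]] + frags(s[k + 1:])
--         return [s]
--
--     m = max(max_missed + 1, 0)
--
--     def emit(fs):
--         if not fs:
--             return []
--         out = []
--         pep = ''
--         for f in fs[:m]:
--             pep += f
--             if min_len <= len(pep) <= max_len:
--                 out.append(pep)
--         return out + emit(fs[1:])
--
--     return emit(frags(protein_sequence))
-- ===== Notes on version B (the rewrite author's own statement) =====
-- stated objective: alternative
-- what changed: B replaces A's index bookkeeping (collect cleavage indices, nested index ranges, re-slice the sequence per (start,end) pair) by structural recursion: it recursively splits the sequence at the first cleavage site into fully-cleaved fragments, then recurses over suffixes of the fragment list, accumulating up to max_missed+1 adjacent fragments per suffix.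
import Mathlib
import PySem

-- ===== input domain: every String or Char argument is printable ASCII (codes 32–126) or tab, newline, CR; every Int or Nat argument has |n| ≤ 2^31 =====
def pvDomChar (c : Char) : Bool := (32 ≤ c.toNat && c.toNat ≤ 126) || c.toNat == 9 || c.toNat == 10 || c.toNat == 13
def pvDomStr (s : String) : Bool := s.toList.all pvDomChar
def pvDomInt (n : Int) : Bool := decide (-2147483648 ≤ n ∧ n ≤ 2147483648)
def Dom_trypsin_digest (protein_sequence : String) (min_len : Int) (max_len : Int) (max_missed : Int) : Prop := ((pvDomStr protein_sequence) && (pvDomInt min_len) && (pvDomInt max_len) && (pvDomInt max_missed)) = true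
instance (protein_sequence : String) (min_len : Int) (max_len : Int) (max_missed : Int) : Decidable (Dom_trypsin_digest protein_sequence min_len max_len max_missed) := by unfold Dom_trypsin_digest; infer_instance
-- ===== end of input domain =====

-- B replaces A's index bookkeeping by structural recursion: recursively split off the
-- fully-cleaved fragment at the first cleavage site, then recurse over suffixes of the
-- fragment list accumulating adjacent fragments (objective: alternative).

-- ===== PORT A =====
-- cleavage-site collection loop of A ('for i, aa in enumerate(protein_sequence): …'), plus the
-- final append of len(protein_sequence); the indexing protein_sequence[i+1] is guarded by
-- i+1 < len, so pyGetD with a dummy default is exact there.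
def pvStepSiteA (chars : List Char) (acc : List Int) (p : Int × Char) : List Int :=
  if (p.2 = 'K' ∨ p.2 = 'R') ∧ p.1 + 1 < (chars.length : Int) then
    if PySem.List.pyGetD chars (p.1 + 1) ' ' ≠ 'P' then acc ++ [p.1 + 1] else acc
  else acc

def pvSitesA (chars : List Char) : List Int :=
  ((PySem.List.enumerate chars 0).foldl (pvStepSiteA chars) [0]) ++ [(chars.length : Int)]

-- the inner-loop body of A: end = cleavage_sites[j]; peptide = protein_sequence[start:end]; length test
def pvStepInA (chars : List Char) (cs : List Int) (mn mx start : Int)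
    (acc : List String) (j : Int) : List String :=
  let e := PySem.List.pyGetD cs j 0
  let peptide := PySem.List.slice chars (some start) (some e)
  if mn ≤ (peptide.length : Int) ∧ (peptide.length : Int) ≤ mx
  then acc ++ [String.ofList peptide] else acc

def trypsin_digest (protein_sequence : String) (min_len : Int) (max_len : Int) (max_missed : Int) : List String :=
  let chars := protein_sequence.toList
  let cs := pvSitesA chars
  (PySem.List.pyRange 0 ((cs.length : Int) - 1) 1).foldl
    (fun peptides i =>
      let start := PySem.List.pyGetD cs i 0
      (PySem.List.pyRange (i + 1) (min (i + 1 + max_missed + 1) (cs.length : Int)) 1).foldl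
        (pvStepInA chars cs min_len max_len start) peptides)
    []

-- ===== PORT B =====
-- B's 'for k in range(len(s)-1): if s[k] in "KR" and s[k+1] != "P": return s[:k+1], s[k+1:]'
-- as structural recursion over the suffix (none = the loop falls through).
def pvFindCutB : List Char → Option (List Char × List Char)
  | [] => none
  | [_] => none
  | c :: d :: rest =>
    if (c = 'K' ∨ c = 'R') ∧ d ≠ 'P' then some ([c], d :: rest)
    else
      match pvFindCutB (d :: rest) with
      | none => none
      | some (p, r) => some (c :: p, r)

theorem pvFindCutB_eq : ∀ (s p r : List Char), pvFindCutB s = some (p, r) → s = p ++ r ∧ p ≠ [] := by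
  intro s
  induction s with
  | nil => intro p r h; simp [pvFindCutB] at h
  | cons c l ih =>
    intro p r h
    cases l with
    | nil => simp [pvFindCutB] at h
    | cons d rest =>
      simp only [pvFindCutB] at h
      split at h
      · injection h with h'
        injection h' with h1 h2
        subst h1; subst h2
        exact ⟨rfl, by simp⟩
      · cases hrec : pvFindCutB (d :: rest) with
        | none => rw [hrec] at h; simp at h
        | some pr =>
          rw [hrec] at h
          obtain ⟨p', r'⟩ := pr
          simp only at h
          injection h with h'
          injection h' with h1 h2
          obtain ⟨hs, _⟩ := ih p' r' hrec
          subst h1; subst h2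
          exact ⟨by rw [List.cons_append, ← hs], by simp⟩

theorem pvFindCutB_lt (s p r : List Char) (h : pvFindCutB s = some (p, r)) : r.length < s.length := by
  obtain ⟨hs, hp⟩ := pvFindCutB_eq s p r h
  rw [hs, List.length_append]
  cases p with
  | nil => exact absurd rfl hp
  | cons _ _ => simp only [List.length_cons]; omega

-- B's frags(s): split off the fragment ending at the first cleavage site, recurse on the rest.
def pvFragsB (s : List Char) : List (List Char) :=
  match h : pvFindCutB s with
  | none => [s]
  | some (p, r) => p :: pvFragsB r
termination_by s.length
decreasing_by exact pvFindCutB_lt s p r h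

-- B's inner loop body: pep += f; append pep when the length is in range
def pvStepB (mn mx : Int) (st : List String × List Char) (f : List Char) : List String × List Char :=
  let pep := st.2 ++ f
  if mn ≤ (pep.length : Int) ∧ (pep.length : Int) ≤ mx
  then (st.1 ++ [String.ofList pep], pep) else (st.1, pep)

-- B's emit(fs): the inner accumulation over fs[:m], then recurse on the tail
def pvEmitB (mn mx : Int) (m : Nat) : List (List Char) → List String
  | [] => []
  | f :: rest => (((f :: rest).take m).foldl (pvStepB mn mx) ([], [])).1 ++ pvEmitB mn mx m rest

def trypsin_digest_alt (protein_sequence : String) (min_len : Int) (max_len : Int) (max_missed : Int) : List String :=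
  pvEmitB min_len max_len (max (max_missed + 1) 0).toNat (pvFragsB protein_sequence.toList)

-- ===== PRECONDITION & SPEC =====
def Spec_trypsin_digest (protein_sequence : String) (min_len : Int) (max_len : Int) (max_missed : Int) (out : List String) : Prop := out = trypsin_digest_alt protein_sequence min_len max_len max_missed
instance (protein_sequence : String) (min_len : Int) (max_len : Int) (max_missed : Int) (out : List String) : Decidable (Spec_trypsin_digest protein_sequence min_len max_len max_missed out) := by unfold Spec_trypsin_digest; infer_instance

-- ===== CLAIM (what is proved, stated in full; the proofs are below) =====
def Claim_equal_trypsin_digest : Prop := ∀ (protein_sequence : String) (min_len : Int) (max_len : Int) (max_missed : Int), Dom_trypsin_digest protein_sequence min_len max_len max_missed → Spec_trypsin_digest protein_sequence min_len max_len max_missed (trypsin_digest protein_sequence min_len max_len max_missed)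

-- ===== LEMMAS AND PROOFS =====

-- boundaries of a fragment list: partial sums of the lengths, starting at t
def pvBnds : List (List Char) → Int → List Int
  | [], t => [t]
  | f :: fs, t => t :: pvBnds fs (t + (f.length : Int))

theorem pvBnds_length (fs : List (List Char)) : ∀ t, (pvBnds fs t).length = fs.length + 1 := by
  induction fs with
  | nil => intro t; rfl
  | cons f fs ih => intro t; simp [pvBnds, ih]

theorem pvBnds_head (fs : List (List Char)) (t : Int) : pvBnds fs t = t :: (pvBnds fs t).tail := by
  cases fs <;> simp [pvBnds]

theorem pvBnds_getD (fs : List (List Char)) : ∀ (t : Int) (m : Nat), m ≤ fs.length →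
    (pvBnds fs t).getD m 0 = t + ((fs.take m).flatten.length : Int) := by
  induction fs with
  | nil =>
    intro t m hm
    have hm0 : m = 0 := by simpa using hm
    subst hm0
    simp [pvBnds]
  | cons f fs ih =>
    intro t m hm
    cases m with
    | zero => simp [pvBnds]
    | succ m' =>
      simp only [pvBnds, List.getD_cons_succ, List.take_succ_cons, List.flatten_cons,
        List.length_append]
      rw [ih _ m' (by simpa using hm)]
      push_cast; ring

-- A's enumerate-scan finds no cleavage site on a suffix with no cut
theorem pvFoldSites_none (chars : List Char) : ∀ (l : List Char), pvFindCutB l = none →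
    ∀ (k : Nat) (acc : List Int), chars.drop k = l →
    (PySem.List.enumerate l (k : Int)).foldl (pvStepSiteA chars) acc = acc := by
  intro l
  induction l with
  | nil => intro _ k acc _; simp [PySem.List.enumerate_nil]
  | cons c l' ih =>
    intro hcut k acc hdrop
    cases l' with
    | nil =>
      have hlen : chars.length = k + 1 := by
        have := congrArg List.length hdrop
        simp [List.length_drop] at this
        omega
      rw [PySem.List.enumerate_cons]
      simp only [List.foldl_cons, PySem.List.enumerate_nil, List.foldl_nil]
      simp only [pvStepSiteA]
      rw [if_neg]
      intro ⟨_, h2⟩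
      omega
    | cons d rest =>
      have hlen2 : k + 2 ≤ chars.length := by
        have := congrArg List.length hdrop
        simp [List.length_drop] at this
        omega
      have hd : PySem.List.pyGetD chars ((k : Int) + 1) ' ' = d := by
        have h1 : (k : Int) + 1 = ((k + 1 : Nat) : Int) := by push_cast; ring
        rw [h1, PySem.List.pyGetD_natCast]
        have : chars[k + 1]? = some d := by
          have h0 : (chars.drop k)[1]? = some d := by rw [hdrop]; rfl
          rwa [List.getElem?_drop] at h0
        simp [List.getD, this]
      simp only [pvFindCutB] at hcut
      split at hcut
      · simp at hcut
      · rename_i hneg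
        cases hrec : pvFindCutB (d :: rest) with
        | some pr => rw [hrec] at hcut; obtain ⟨_, _⟩ := pr; simp at hcut
        | none =>
          rw [PySem.List.enumerate_cons]
          simp only [List.foldl_cons]
          have hstep : pvStepSiteA chars acc ((k : Int), c) = acc := by
            simp only [pvStepSiteA]
            by_cases hc : (c = 'K' ∨ c = 'R')
            · rw [if_pos ⟨hc, by push_cast; omega⟩, if_neg]
              rw [hd]
              simp only [ne_eq, not_not]
              by_contra hdP
              exact hneg ⟨hc, hdP⟩
            · rw [if_neg]; tauto
          rw [hstep]
          have hdrop' : chars.drop (k + 1) = d :: rest := by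
            have h0 : (chars.drop k).drop 1 = d :: rest := by rw [hdrop]; rfl
            rw [List.drop_drop] at h0
            exact h0
          have := ih hrec (k + 1) acc hdrop'
          rw [show ((k : Int) + 1) = ((k + 1 : Nat) : Int) by push_cast; ring]
          exact this

-- A's enumerate-scan on a suffix with a first cut: one site is appended, then the scan continues
theorem pvFoldSites_cut (chars : List Char) : ∀ (l p r : List Char), pvFindCutB l = some (p, r) →
    ∀ (k : Nat) (acc : List Int), chars.drop k = l →
    (PySem.List.enumerate l (k : Int)).foldl (pvStepSiteA chars) acc
      = (PySem.List.enumerate r ((k + p.length : Nat) : Int)).foldl (pvStepSiteA chars)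
          (acc ++ [((k + p.length : Nat) : Int)]) := by
  intro l
  induction l with
  | nil => intro p r h; simp [pvFindCutB] at h
  | cons c l' ih =>
    intro p r hcut k acc hdrop
    cases l' with
    | nil => simp [pvFindCutB] at hcut
    | cons d rest =>
      have hlen2 : k + 2 ≤ chars.length := by
        have := congrArg List.length hdrop
        simp [List.length_drop] at this
        omega
      have hd : PySem.List.pyGetD chars ((k : Int) + 1) ' ' = d := by
        have h1 : (k : Int) + 1 = ((k + 1 : Nat) : Int) := by push_cast; ring
        rw [h1, PySem.List.pyGetD_natCast]
        have : chars[k + 1]? = some d := by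
          have h0 : (chars.drop k)[1]? = some d := by rw [hdrop]; rfl
          rwa [List.getElem?_drop] at h0
        simp [List.getD, this]
      have hdrop' : chars.drop (k + 1) = d :: rest := by
        have h0 : (chars.drop k).drop 1 = d :: rest := by rw [hdrop]; rfl
        rw [List.drop_drop] at h0
        exact h0
      simp only [pvFindCutB] at hcut
      rw [PySem.List.enumerate_cons]
      simp only [List.foldl_cons]
      split at hcut
      · rename_i hc
        injection hcut with h'
        injection h' with hp hr
        subst hp; subst hr
        have hstep : pvStepSiteA chars acc ((k : Int), c) = acc ++ [(k : Int) + 1] := by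
          simp only [pvStepSiteA]
          rw [if_pos ⟨hc.1, by push_cast; omega⟩, if_pos (by rw [hd]; exact hc.2)]
        rw [hstep]
        simp only [List.length_cons, List.length_nil]
        rw [show ((k + (0 + 1) : Nat) : Int) = (k : Int) + 1 by push_cast; ring]
      · rename_i hneg
        cases hrec : pvFindCutB (d :: rest) with
        | none => rw [hrec] at hcut; simp at hcut
        | some pr =>
          rw [hrec] at hcut
          obtain ⟨p', r'⟩ := pr
          simp only at hcut
          injection hcut with h'
          injection h' with hp hr
          subst hp; subst hr
          have hstep : pvStepSiteA chars acc ((k : Int), c) = acc := by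
            simp only [pvStepSiteA]
            by_cases hc : (c = 'K' ∨ c = 'R')
            · rw [if_pos ⟨hc, by push_cast; omega⟩, if_neg]
              rw [hd]
              simp only [ne_eq, not_not]
              by_contra hdP
              exact hneg ⟨hc, hdP⟩
            · rw [if_neg]; tauto
          rw [hstep]
          have hll : k + (c :: p').length = k + 1 + p'.length := by
            simp [List.length_cons]; omega
          rw [hll]
          have := ih p' r' hrec (k + 1) acc hdrop'
          rw [show ((k : Int) + 1) = ((k + 1 : Nat) : Int) by push_cast; ring, this]

-- the boundaries of B's fragments are exactly A's cleavage-site list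
theorem pvSitesFragsAux (chars : List Char) : ∀ (n : Nat) (l : List Char), l.length ≤ n →
    ∀ (k : Nat) (acc : List Int), chars.drop k = l → k ≤ chars.length →
    ((PySem.List.enumerate l (k : Int)).foldl (pvStepSiteA chars) acc) ++ [(chars.length : Int)]
      = acc ++ (pvBnds (pvFragsB l) (k : Int)).tail := by
  intro n
  induction n with
  | zero =>
    intro l hl k acc hdrop hk
    have hln : l = [] := by cases l with | nil => rfl | cons _ _ => simp at hl
    subst hln
    have hke : chars.length = k := by
      have := congrArg List.length hdrop
      simp [List.length_drop] at this
      omega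
    rw [pvFragsB]
    simp [pvFindCutB, pvBnds, PySem.List.enumerate_nil, hke]
  | succ n ihn =>
    intro l hl k acc hdrop hk
    rw [pvFragsB]
    cases hcut : pvFindCutB l with
    | none =>
      have hke : chars.length = k + l.length := by
        have := congrArg List.length hdrop
        simp [List.length_drop] at this
        omega
      rw [pvFoldSites_none chars l hcut k acc hdrop]
      simp [pvBnds, hke]
    | some pr =>
      obtain ⟨p, r⟩ := pr
      obtain ⟨hs, hp⟩ := pvFindCutB_eq l p r hcut
      have hplen : 1 ≤ p.length := by cases p with | nil => exact absurd rfl hp | cons _ _ => simp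
      have hdropr : chars.drop (k + p.length) = r := by
        rw [← List.drop_drop, hdrop, hs]
        simp
      have hkp : k + p.length ≤ chars.length := by
        have := congrArg List.length hdrop
        simp [List.length_drop] at this
        have : l.length = chars.length - k := by omega
        have hlen : p.length + r.length = l.length := by
          have := congrArg List.length hs; simp at this; omega
        omega
      have hrlen : r.length ≤ n := by
        have hlen : p.length + r.length = l.length := by
          have := congrArg List.length hs; simp at this; omega
        omega
      rw [pvFoldSites_cut chars l p r hcut k acc hdrop]
      rw [ihn r hrlen (k + p.length) (acc ++ [((k + p.length : Nat) : Int)]) hdropr hkp]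
      simp only [pvBnds, List.tail_cons]
      rw [pvBnds_head (pvFragsB r) ((k : Int) + (p.length : Int))]
      rw [List.append_assoc]
      congr 2

theorem pvFragsB_flatten : ∀ (n : Nat) (l : List Char), l.length ≤ n → (pvFragsB l).flatten = l := by
  intro n
  induction n with
  | zero =>
    intro l hl
    have hln : l = [] := by cases l with | nil => rfl | cons _ _ => simp at hl
    subst hln
    rw [pvFragsB]; simp [pvFindCutB]
  | succ n ihn =>
    intro l hl
    rw [pvFragsB]
    cases hcut : pvFindCutB l with
    | none => simp
    | some pr =>
      obtain ⟨p, r⟩ := pr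
      obtain ⟨hs, hp⟩ := pvFindCutB_eq l p r hcut
      have hplen : 1 ≤ p.length := by cases p with | nil => exact absurd rfl hp | cons _ _ => simp
      have hrlen : r.length ≤ n := by
        have hlen : p.length + r.length = l.length := by
          have := congrArg List.length hs; simp at this; omega
        omega
      simp only [List.flatten_cons, ihn r hrlen]
      exact hs.symm

theorem pvSitesFrags (chars : List Char) :
    pvSitesA chars = pvBnds (pvFragsB chars) 0 ∧ (pvFragsB chars).flatten = chars := by
  constructor
  · have h := pvSitesFragsAux chars chars.length chars (le_refl _) 0 [0] (by simp) (by simp)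
    simp only [Int.natCast_zero] at h
    show ((PySem.List.enumerate chars 0).foldl (pvStepSiteA chars) [0]) ++ [(chars.length : Int)]
        = pvBnds (pvFragsB chars) 0
    rw [h, pvBnds_head (pvFragsB chars) 0]
    rfl
  · exact pvFragsB_flatten chars.length chars (le_refl _)

-- take of a flatten at a fragment boundary
theorem pvTakeFlatten (fs : List (List Char)) : ∀ (b : Nat),
    fs.flatten.take ((fs.take b).flatten.length) = (fs.take b).flatten := by
  induction fs with
  | nil => intro b; simp
  | cons f fs ih =>
    intro b
    cases b with
    | zero => simp
    | succ b' =>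
      simp only [List.take_succ_cons, List.flatten_cons, List.length_append]
      rw [List.take_append, List.take_of_length_le (Nat.le_add_right _ _),
        Nat.add_sub_cancel_left, ih b']

theorem pvSliceFlatten (fs : List (List Char)) : ∀ (a b : Nat), a ≤ b →
    (fs.flatten.drop ((fs.take a).flatten.length)).take
        ((fs.take b).flatten.length - (fs.take a).flatten.length)
      = ((fs.drop a).take (b - a)).flatten := by
  induction fs with
  | nil => intro a b _; simp
  | cons f fs ih =>
    intro a b hab
    cases a with
    | zero =>
      simp only [List.take_zero, List.flatten_nil, List.length_nil, List.drop_zero,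
        Nat.sub_zero]
      exact pvTakeFlatten (f :: fs) b
    | succ a' =>
      cases b with
      | zero => omega
      | succ b' =>
        simp only [List.take_succ_cons, List.flatten_cons, List.length_append,
          List.drop_succ_cons, Nat.succ_sub_succ]
        rw [List.drop_append]
        simp only [Nat.add_sub_cancel_left,
          List.drop_of_length_le (Nat.le_add_right _ _), List.nil_append]
        rw [Nat.add_sub_add_left]
        exact ih a' b' (by omega)

-- appending the next fragment extends the accumulated peptide by one boundary
theorem pvPepSnoc (fs : List (List Char)) (i j : Nat) (hij : i ≤ j) (hj : j < fs.length) :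
    ((fs.drop i).take (j - i)).flatten ++ fs.getD j []
      = ((fs.drop i).take (j + 1 - i)).flatten := by
  have hlt : j - i < (fs.drop i).length := by simp [List.length_drop]; omega
  have h1 : (fs.drop i).take (j + 1 - i) = (fs.drop i).take (j - i) ++ [(fs.drop i)[j - i]'hlt] := by
    have : j + 1 - i = (j - i) + 1 := by omega
    rw [this, List.take_succ, List.getElem?_eq_getElem hlt]
    rfl
  have h2 : (fs.drop i)[j - i]'hlt = fs.getD j [] := by
    rw [List.getElem_drop]
    rw [List.getD_eq_getElem fs [] (by omega)]
    congr 1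
    omega
  rw [h1, List.flatten_append, h2]
  simp

-- B's fold only appends to its first component
theorem pvStepB_acc (mn mx : Int) : ∀ (L : List (List Char)) (acc : List String) (pep : List Char),
    L.foldl (pvStepB mn mx) (acc, pep)
      = (acc ++ (L.foldl (pvStepB mn mx) ([], pep)).1, (L.foldl (pvStepB mn mx) ([], pep)).2) := by
  intro L
  induction L with
  | nil => intro acc pep; simp
  | cons f L ih =>
    intro acc pep
    simp only [List.foldl_cons]
    rw [show pvStepB mn mx (acc, pep) f
        = ((pvStepB mn mx (acc, pep) f).1, (pvStepB mn mx ([], pep) f).2) by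
      simp only [pvStepB]; split <;> rfl]
    rw [ih ((pvStepB mn mx (acc, pep) f).1)]
    rw [ih ((pvStepB mn mx ([], pep) f).1)]
    have hfst : (pvStepB mn mx (acc, pep) f).1 = acc ++ (pvStepB mn mx ([], pep) f).1 := by
      simp only [pvStepB]; split <;> simp
    rw [hfst, List.append_assoc]

-- inner-loop equivalence: A re-slices from cleavage_sites, B folds over the fragment sublist
theorem pvInnerEq (chars : List Char) (fs : List (List Char)) (cs : List Int)
    (hcs : cs = pvBnds fs 0) (hch : fs.flatten = chars) (mn mx : Int) (i : Nat) :
    ∀ (c : Nat) (j : Nat), i ≤ j → j + c ≤ fs.length → ∀ (acc : List String),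
    (PySem.List.pyRange ((j : Int) + 1) ((j : Int) + (c : Int) + 1) 1).foldl
        (pvStepInA chars cs mn mx (((fs.take i).flatten.length : Nat) : Int)) acc
      = (((fs.drop j).take c).foldl (pvStepB mn mx)
          (acc, ((fs.drop i).take (j - i)).flatten)).1 := by
  intro c
  induction c with
  | zero =>
    intro j hij hjc acc
    rw [show ((j : Int) + ((0 : Nat) : Int) + 1) = (j : Int) + 1 by push_cast; ring]
    rw [PySem.List.pyRange_one_eq_nil (le_refl _)]
    simp
  | succ c ihc =>
    intro j hij hjc acc
    have hj : j < fs.length := by omega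
    have hdropj : fs.drop j = fs[j] :: fs.drop (j + 1) := List.drop_eq_getElem_cons hj
    rw [PySem.List.pyRange_one_cons (by push_cast; omega)]
    rw [hdropj]
    simp only [List.take_succ_cons, List.foldl_cons]
    have hgetj1 : PySem.List.pyGetD cs ((j : Int) + 1) 0
        = (((fs.take (j + 1)).flatten.length : Nat) : Int) := by
      rw [show ((j : Int) + 1) = ((j + 1 : Nat) : Int) by push_cast; ring,
        PySem.List.pyGetD_natCast, hcs, pvBnds_getD _ _ _ (by omega)]
      simp
    have hslice : PySem.List.slice chars (some (((fs.take i).flatten.length : Nat) : Int))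
          (some (((fs.take (j + 1)).flatten.length : Nat) : Int))
        = ((fs.drop i).take (j + 1 - i)).flatten := by
      rw [PySem.List.slice_natCast, ← hch]
      exact pvSliceFlatten fs i (j + 1) (by omega)
    have hpep : ((fs.drop i).take (j - i)).flatten ++ fs[j]
        = ((fs.drop i).take (j + 1 - i)).flatten := by
      have := pvPepSnoc fs i j hij hj
      rwa [List.getD_eq_getElem fs [] hj] at this
    have hstep : pvStepInA chars cs mn mx (((fs.take i).flatten.length : Nat) : Int) acc ((j : Int) + 1)
        = (pvStepB mn mx (acc, ((fs.drop i).take (j - i)).flatten) fs[j]).1 := by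
      simp only [pvStepInA, pvStepB, hgetj1, hslice, hpep]
      split <;> rfl
    have hsnd : (pvStepB mn mx (acc, ((fs.drop i).take (j - i)).flatten) fs[j]).2
        = ((fs.drop i).take (j + 1 - i)).flatten := by
      simp only [pvStepB, hpep]
      split <;> rfl
    rw [hstep]
    have hpair : pvStepB mn mx (acc, ((fs.drop i).take (j - i)).flatten) fs[j]
        = ((pvStepB mn mx (acc, ((fs.drop i).take (j - i)).flatten) fs[j]).1,
            ((fs.drop i).take ((j + 1) - i)).flatten) := by
      rw [← hsnd]
    rw [hpair]
    have := ihc (j + 1) (by omega) (by omega)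
      ((pvStepB mn mx (acc, ((fs.drop i).take (j - i)).flatten) fs[j]).1)
    rw [show ((j : Int) + ((c + 1 : Nat) : Int) + 1) = (((j + 1 : Nat) : Int) + (c : Int) + 1) by push_cast; ring]
    rw [show ((j : Int) + 1 + 1) = (((j + 1 : Nat) : Int) + 1) by push_cast; ring]
    exact this

-- outer equivalence: A's index loop over cleavage-site pairs = B's recursion over fragment suffixes
theorem pvOuterEq (chars : List Char) (fs : List (List Char)) (cs : List Int)
    (hcs : cs = pvBnds fs 0) (hch : fs.flatten = chars) (mn mx mm : Int) :
    ∀ (g : List (List Char)) (i : Nat) (acc : List String), fs.drop i = g →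
    (PySem.List.pyRange (i : Int) ((fs.length : Nat) : Int) 1).foldl
      (fun peptides x =>
        let start := PySem.List.pyGetD cs x 0
        (PySem.List.pyRange (x + 1) (min (x + 1 + mm + 1) (cs.length : Int)) 1).foldl
          (pvStepInA chars cs mn mx start) peptides) acc
      = acc ++ pvEmitB mn mx (max (mm + 1) 0).toNat g := by
  intro g
  induction g with
  | nil =>
    intro i acc hdrop
    have hge : fs.length ≤ i := by
      by_contra h
      have := List.drop_eq_nil_iff.mp hdrop
      omega
    rw [PySem.List.pyRange_one_eq_nil (by push_cast; omega)]
    simp [pvEmitB]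
  | cons f rest ih =>
    intro i acc hdrop
    have hi : i < fs.length := by
      by_contra h
      rw [List.drop_eq_nil_of_le (by omega)] at hdrop
      exact List.cons_ne_nil _ _ hdrop.symm
    have hcl : cs.length = fs.length + 1 := by rw [hcs, pvBnds_length]
    set m := (max (mm + 1) 0).toNat with hm
    set c := min m (fs.length - i) with hc
    have hstart : PySem.List.pyGetD cs (i : Int) 0
        = (((fs.take i).flatten.length : Nat) : Int) := by
      rw [PySem.List.pyGetD_natCast, hcs, pvBnds_getD _ _ _ (by omega)]
      simp
    have hrange : PySem.List.pyRange ((i : Int) + 1) (min ((i : Int) + 1 + mm + 1) (cs.length : Int)) 1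
        = PySem.List.pyRange ((i : Int) + 1) ((i : Int) + (c : Int) + 1) 1 := by
      by_cases hmm : mm + 1 ≤ 0
      · have hm0 : m = 0 := by simp [hm]; omega
        have hc0 : c = 0 := by simp [hc, hm0]
        rw [hc0, hcl]
        rw [PySem.List.pyRange_one_eq_nil (by push_cast; omega),
          PySem.List.pyRange_one_eq_nil (by push_cast; omega)]
      · congr 1
        have hmv : (m : Int) = mm + 1 := by simp [hm]; omega
        rw [hcl]
        have : (c : Int) = min (m : Int) ((fs.length : Int) - (i : Int)) := by
          simp [hc]; omega
        rw [this, hmv]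
        push_cast
        omega
    rw [PySem.List.pyRange_one_cons (by push_cast; omega)]
    simp only [List.foldl_cons]
    rw [hstart, hrange]
    have hinner := pvInnerEq chars fs cs hcs hch mn mx i c i (le_refl _) (by omega) acc
    simp only [Nat.sub_self, List.take_zero, List.flatten_nil] at hinner
    rw [hinner]
    rw [pvStepB_acc]
    have htake : (fs.drop i).take c = (f :: rest).take m := by
      rw [hdrop]
      have hlen : (f :: rest).length = fs.length - i := by
        rw [← hdrop]; simp
      rw [show c = min m (f :: rest).length by rw [hlen]]
      rw [← List.take_take, List.take_length]
    have hdrop' : fs.drop (i + 1) = rest := by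
      have h0 : (fs.drop i).drop 1 = rest := by rw [hdrop]; rfl
      rw [List.drop_drop] at h0
      exact h0
    rw [show ((i : Int) + 1) = ((i + 1 : Nat) : Int) by push_cast; ring]
    rw [ih (i + 1) _ hdrop']
    rw [htake]
    conv_rhs => rw [pvEmitB]
    simp

-- ===== VERDICT (by name: the statement is the Claim_ definition above) =====
theorem trypsin_digest_spec : Claim_equal_trypsin_digest := by
  intro s mn mx mm _
  unfold Spec_trypsin_digest trypsin_digest trypsin_digest_alt
  dsimp only
  obtain ⟨hcs, hch⟩ := pvSitesFrags s.toList
  set chars := s.toList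
  set fs := pvFragsB chars with hfs
  set cs := pvSitesA chars with hcseq
  have hlen : (cs.length : Int) - 1 = ((fs.length : Nat) : Int) := by
    rw [hcs, pvBnds_length]; push_cast; ring
  rw [hlen]
  have H := pvOuterEq chars fs cs hcs hch mn mx mm fs 0 [] (by simp)
  simpa using H
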